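-- pv_equiv track=rewrite | github.com/not-a-raccoon/advent-of-code-2024 | 2024-12-22/2024-12-22.py | generate_many
-- ===== SOURCE A (Python) =====
-- def mix(a: int, b: int):
--     return a ^ b
--
-- def prune(a: int):
--     return a & ((1 << 24) - 1)
--
-- def generate(a: int):
--     b = prune(mix(a, a << 6))
--     c = prune(mix(b, b >> 5))
--     d = prune(mix(c, c << 11))
--     return d
--
-- def use(a: int):
--     return a % 10
--
-- def generate_many(a: int, n: int):
--     archive = {}
--     last_four = []
--     for i in range(n):
--         b = generate(a)
--         last_four.append(use(b) - use(a))
--         if i >= 4: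
--             last_four.pop(0)
--         if i >= 3:
--             if tuple(last_four) not in archive:
--                 archive[tuple(last_four)] = use(b)
--
--         a = b
--     return archive
-- ===== SOURCE B (Python) =====
-- def mix(a: int, b: int):
--     return a ^ b
--
-- def prune(a: int):
--     return a & ((1 << 24) - 1)
--
-- def generate(a: int):
--     b = prune(mix(a, a << 6))
--     c = prune(mix(b, b >> 5))
--     d = prune(mix(c, c << 11))
--     return d
--
-- def use(a: int):
--     return a % 10
--
-- def generate_many(a: int, n: int):
--     # build the whole price sequence first, then diffs, then one window pass
--     prices = [use(a)]
--     s = a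
--     for _ in range(n):
--         s = generate(s)
--         prices.append(use(s))
--     diffs = [q - p for p, q in zip(prices, prices[1:])]
--     archive = {}
--     for key, price in zip(zip(diffs, diffs[1:], diffs[2:], diffs[3:]), prices[4:]):
--         archive.setdefault(key, price)
--     return archive
-- ===== Notes on version B (the rewrite author's own statement) =====
-- stated objective: alternative
-- what changed: A's single integrated loop carrying a rolling 4-element window list and updating the dict in flight is replaced by a build-then-scan decomposition: first materialise the whole price list, then the difference list, then fill the dict in one zip-based sliding-window pass with setdefault.
import Mathlib
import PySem

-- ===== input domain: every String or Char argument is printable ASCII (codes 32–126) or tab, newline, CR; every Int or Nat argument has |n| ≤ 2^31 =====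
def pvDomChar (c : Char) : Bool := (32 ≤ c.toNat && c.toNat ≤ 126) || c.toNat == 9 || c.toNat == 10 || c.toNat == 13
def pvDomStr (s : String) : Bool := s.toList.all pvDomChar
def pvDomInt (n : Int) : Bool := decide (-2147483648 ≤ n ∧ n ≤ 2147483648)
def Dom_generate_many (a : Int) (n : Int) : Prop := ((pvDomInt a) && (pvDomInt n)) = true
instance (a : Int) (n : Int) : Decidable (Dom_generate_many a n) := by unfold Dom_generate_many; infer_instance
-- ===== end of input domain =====

-- B replaces A's single integrated loop (rolling window list + dict updated in flight) by a
-- build-then-scan decomposition: precompute the price list, then the diff list, then one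
-- zip-based window pass filling the dict (objective: alternative decomposition, same cost).

-- ===== PORT A =====  (shared module helpers mix/prune/generate/use)
def pvMix (a b : Int) : Int := PySem.Int.bxor a b
def pvPrune (a : Int) : Int := PySem.Int.band a ((1 <<< 24) - 1)
def pvGenerate (a : Int) : Int :=
  let b := pvPrune (pvMix a (a <<< 6))
  let c := pvPrune (pvMix b (b >>> 5))
  let d := pvPrune (pvMix c (c <<< 11))
  d
def pvUse (a : Int) : Int := PySem.Int.mod a 10

def generate_many (a : Int) (n : Int) : List (List Int × Int) :=
  -- archive = {}; last_four = []; for i in range(n): … ; return archive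
  let st := (PySem.List.pyRange 0 n 1).foldl
    (fun (st : PySem.Dict (List Int) Int × List Int × Int) i =>
      let b := pvGenerate st.2.2
      let lf1 := st.2.1 ++ [pvUse b - pvUse st.2.2]          -- last_four.append(use(b) - use(a))
      let lf2 := if (4:Int) ≤ i then
          (match PySem.List.pop? lf1 0 with | some r => r.2 | none => lf1)  -- last_four.pop(0)
        else lf1
      let arch := if (3:Int) ≤ i then
          (if st.1.contains lf2 = false then st.1.insert lf2 (pvUse b) else st.1)
        else st.1
      (arch, lf2, b))
    (PySem.Dict.empty, [], a)
  st.1.items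

-- ===== PORT B =====
-- zip(d, d[1:], d[2:], d[3:]); the Python 4-tuple key is ported as a 4-element list
-- (matching the List Int key type the convention gives A's tuple(last_four)).
def pvZip4 : List Int → List Int → List Int → List Int → List (List Int)
  | x :: xs, y :: ys, z :: zs, w :: ws => [x, y, z, w] :: pvZip4 xs ys zs ws
  | _, _, _, _ => []

def generate_many_alt (a : Int) (n : Int) : List (List Int × Int) :=
  let pr := (PySem.List.pyRange 0 n 1).foldl
    (fun (st : List Int × Int) _ => let s := pvGenerate st.2; (st.1 ++ [pvUse s], s))
    ([pvUse a], a)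
  let prices := pr.1
  let diffs := (prices.zip (PySem.List.slice prices (some 1) none)).map (fun pq => pq.2 - pq.1)
  let keys := pvZip4 diffs (PySem.List.slice diffs (some 1) none)
      (PySem.List.slice diffs (some 2) none) (PySem.List.slice diffs (some 3) none)
  ((keys.zip (PySem.List.slice prices (some 4) none)).foldl
    (fun d kp => PySem.Dict.setdefault d kp.1 kp.2) PySem.Dict.empty).items

-- ===== PRECONDITION & SPEC =====
def Spec_generate_many (a : Int) (n : Int) (out : List (List Int × Int)) : Prop := out = generate_many_alt a n
instance (a : Int) (n : Int) (out : List (List Int × Int)) : Decidable (Spec_generate_many a n out) := by unfold Spec_generate_many; infer_instance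

-- ===== CLAIM (what is proved, stated in full; the proofs are below) =====
def Claim_equal_generate_many : Prop := ∀ (a : Int) (n : Int), Dom_generate_many a n → Spec_generate_many a n (generate_many a n)

-- ===== LEMMAS AND PROOFS =====

-- the secret sequence, its prices, price differences, 4-windows, and the (key, value) pair list
def pvSec (a : Int) : Nat → Int
  | 0 => a
  | k+1 => pvGenerate (pvSec a k)
def pvPri (a : Int) (k : Nat) : Int := pvUse (pvSec a k)
def pvDD (a : Int) (k : Nat) : Int := pvPri a (k+1) - pvPri a k
def pvWin (a : Int) (i : Nat) : List Int := [pvDD a i, pvDD a (i+1), pvDD a (i+2), pvDD a (i+3)]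
def pvPairs (a : Int) (m : Nat) : List (List Int × Int) :=
  (List.range m).map (fun i => (pvWin a i, pvPri a (i+4)))
def pvStep (d : PySem.Dict (List Int) Int) (kp : List Int × Int) : PySem.Dict (List Int) Int :=
  if d.contains kp.1 = false then d.insert kp.1 kp.2 else d

lemma pvSec_shift (a : Int) (k : Nat) : pvSec a (k+1) = pvSec (pvGenerate a) k := by
  induction k with
  | zero => rfl
  | succ k ih => simp [pvSec] at ih ⊢; rw [ih]

lemma pvSetdefault_eq (d : PySem.Dict (List Int) Int) (k : List Int) (v : Int) :
    PySem.Dict.setdefault d k v = pvStep d (k, v) := by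
  by_cases h : d.contains k = true
  · simp [PySem.Dict.setdefault, pvStep, h]
  · simp only [Bool.not_eq_true] at h
    have hi := PySem.Dict.items_insert_of_not_contains d v h
    simp only [PySem.Dict.setdefault, pvStep, h, Bool.false_eq_true, if_false, if_pos]
    calc PySem.Dict.mk (d.items ++ [(k, v)])
        = PySem.Dict.mk ((d.insert k v).items) := by rw [hi]
      _ = d.insert k v := rfl

lemma pvWindow_drop (a : Int) (m : Nat) :
    ((List.range (m+4)).map (pvDD a)).drop m = pvWin a m := by
  rw [List.range_add, List.map_append,
      List.drop_append_of_le_length (by simp)]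
  simp [pvWin, show List.range 4 = [0, 1, 2, 3] from rfl]

lemma pvZip4_eq_zip (as bs cs ds : List Int) :
    pvZip4 as bs cs ds
      = (as.zip (bs.zip (cs.zip ds))).map (fun x => [x.1, x.2.1, x.2.2.1, x.2.2.2]) := by
  induction as generalizing bs cs ds with
  | nil => simp [pvZip4]
  | cons x xs ih =>
    cases bs with
    | nil => simp [pvZip4]
    | cons y ys =>
      cases cs with
      | nil => simp [pvZip4]
      | cons z zs =>
        cases ds with
        | nil => simp [pvZip4]
        | cons w ws => simp [pvZip4, ih]

lemma pvFoldA (a : Int) (k : Nat) :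
    ((List.range k).map (fun (j : Nat) => ((0:Int) + (j:Int)))).foldl
      (fun (st : PySem.Dict (List Int) Int × List Int × Int) i =>
        let b := pvGenerate st.2.2
        let lf1 := st.2.1 ++ [pvUse b - pvUse st.2.2]
        let lf2 := if (4:Int) ≤ i then
            (match PySem.List.pop? lf1 0 with | some r => r.2 | none => lf1)
          else lf1
        let arch := if (3:Int) ≤ i then
            (if st.1.contains lf2 = false then st.1.insert lf2 (pvUse b) else st.1)
          else st.1
        (arch, lf2, b))
      (PySem.Dict.empty, [], a)
    = ((pvPairs a (k-3)).foldl pvStep PySem.Dict.empty,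
       ((List.range k).map (pvDD a)).drop (k-4), pvSec a k) := by
  induction k with
  | zero => rfl
  | succ k ih =>
    conv_lhs => rw [List.range_succ, List.map_append, List.foldl_append]
    rw [ih]
    simp only [List.map_cons, List.map_nil, List.foldl_cons, List.foldl_nil]
    have hb : pvGenerate (pvSec a k) = pvSec a (k+1) := rfl
    have hdd : pvUse (pvSec a (k+1)) - pvUse (pvSec a k) = pvDD a k := rfl
    have hlf1 : (((List.range k).map (pvDD a)).drop (k-4)) ++ [pvDD a k]
        = ((List.range (k+1)).map (pvDD a)).drop (k-4) := by
      rw [List.range_succ, List.map_append,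
          List.drop_append_of_le_length (by simp only [List.length_map, List.length_range]; omega)]
      simp
    by_cases h4 : 4 ≤ k
    · -- pop fires, record fires
      have hc4 : ((4:Int) ≤ (0:Int) + (k:Int)) := by omega
      have hc3 : ((3:Int) ≤ (0:Int) + (k:Int)) := by omega
      simp only [hb, hdd, hlf1, if_pos hc4, if_pos hc3]
      have hlen : (((List.range (k+1)).map (pvDD a)).drop (k-4)).length = 5 := by
        simp; omega
      obtain ⟨x, xs, hx⟩ := List.exists_cons_of_ne_nil
        (l := ((List.range (k+1)).map (pvDD a)).drop (k-4))
        (by intro h; rw [h] at hlen; simp at hlen)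
      have htail : xs = ((List.range (k+1)).map (pvDD a)).drop (k-3) := by
        have ht : (((List.range (k+1)).map (pvDD a)).drop (k-4)).tail
            = ((List.range (k+1)).map (pvDD a)).drop (k-4+1) := List.tail_drop
        rw [hx] at ht
        simpa [show k-4+1 = k-3 by omega] using ht
      rw [hx]
      simp only [PySem.List.pop?_zero_cons]
      rw [htail]
      have hm : k + 1 = (k-3) + 4 := by omega
      have hwin : ((List.range (k+1)).map (pvDD a)).drop (k-3) = pvWin a (k-3) := by
        rw [show (List.range (k+1)) = List.range ((k-3)+4) by rw [← hm]]
        exact pvWindow_drop a (k-3)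
      have hpri : pvUse (pvSec a (k+1)) = pvPri a ((k-3)+4) := by
        rw [← hm]; rfl
      have hpairs : pvPairs a (k+1-3)
          = pvPairs a (k-3) ++ [(pvWin a (k-3), pvPri a ((k-3)+4))] := by
        rw [show k+1-3 = (k-3)+1 by omega]
        simp [pvPairs, List.range_succ]
      rw [hwin, hpairs, List.foldl_append]
      simp only [List.foldl_cons, List.foldl_nil, Prod.mk.injEq]
      refine ⟨?_, ?_, by trivial⟩
      · simp [pvStep, hpri]
      · rw [show k+1-4 = k-3 by omega, hwin]
    · by_cases h3 : 3 ≤ k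
      · -- k = 3 : no pop, record fires
        have hk : k = 3 := by omega
        subst hk
        have hc4 : ¬ ((4:Int) ≤ (0:Int) + ((3:Nat):Int)) := by omega
        have hc3 : ((3:Int) ≤ (0:Int) + ((3:Nat):Int)) := by omega
        simp only [hb, hdd, hlf1, if_neg hc4, if_pos hc3, Prod.mk.injEq]
        have hwin : ((List.range 4).map (pvDD a)).drop 0 = pvWin a 0 := pvWindow_drop a 0
        rw [show List.range (3+1) = List.range 4 from rfl, hwin]
        simp [pvPairs, pvStep, pvPri]
      · -- k < 3 : nothing fires
        have hc4 : ¬ ((4:Int) ≤ (0:Int) + (k:Int)) := by omega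
        have hc3 : ¬ ((3:Int) ≤ (0:Int) + (k:Int)) := by omega
        simp only [hb, hdd, hlf1, if_neg hc4, if_neg hc3, Prod.mk.injEq]
        refine ⟨?_, ?_, by trivial⟩
        · rw [show k+1-3 = 0 by omega, show k-3 = 0 by omega]
        · rw [show k+1-4 = 0 by omega, show k-4 = 0 by omega]

lemma pvA_eq (a : Int) (n : Int) :
    generate_many a n = ((pvPairs a (n.toNat-3)).foldl pvStep PySem.Dict.empty).items := by
  unfold generate_many
  rw [PySem.List.pyRange_one]
  simp only [Int.sub_zero]
  exact congrArg (fun st => st.1.items) (pvFoldA a n.toNat)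

lemma pvPricesFold (l : List Int) (acc : List Int) (s : Int) :
    l.foldl (fun (st : List Int × Int) (_ : Int) =>
        (st.1 ++ [pvUse (pvGenerate st.2)], pvGenerate st.2)) (acc, s)
    = (acc ++ (List.range l.length).map (fun j => pvPri s (j+1)), pvSec s l.length) := by
  induction l generalizing acc s with
  | nil => simp [pvSec]
  | cons x xs ih =>
    simp only [List.foldl_cons, List.length_cons]
    rw [ih]
    simp only [Prod.mk.injEq]
    refine ⟨?_, (pvSec_shift s xs.length).symm⟩
    rw [List.range_succ_eq_map, List.append_assoc]
    simp only [List.map_cons, List.map_map, List.singleton_append]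
    congr 1
    congr 1
    apply List.map_congr_left
    intro j _
    show pvPri (pvGenerate s) (j+1) = pvPri s (j.succ+1)
    unfold pvPri
    rw [show pvSec s (j.succ+1) = pvSec (pvGenerate s) (j+1) from pvSec_shift s (j+1)]

lemma pvPrices_eq (a : Int) (k : Nat) :
    [pvUse a] ++ (List.range k).map (fun j => pvPri a (j+1))
      = (List.range (k+1)).map (pvPri a) := by
  rw [List.range_succ_eq_map]
  simp only [List.map_cons, List.map_map, List.singleton_append]
  congr 1

lemma pvDiffs_eq (a : Int) (k : Nat) :
    (((List.range (k+1)).map (pvPri a)).zip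
        ((((List.range (k+1)).map (pvPri a))).drop 1)).map (fun pq => pq.2 - pq.1)
    = (List.range k).map (pvDD a) := by
  apply List.ext_getElem
  · simp only [List.length_map, List.length_range, List.length_zip, List.length_drop]
    omega
  · intro i h1 h2
    simp only [List.getElem_map, List.getElem_zip, List.getElem_drop, List.getElem_range]
    simp [pvDD, Nat.add_comm]

lemma pvKeys_eq (a : Int) (k : Nat) :
    pvZip4 ((List.range k).map (pvDD a)) (((List.range k).map (pvDD a)).drop 1)
        (((List.range k).map (pvDD a)).drop 2) (((List.range k).map (pvDD a)).drop 3)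
    = (List.range (k-3)).map (pvWin a) := by
  rw [pvZip4_eq_zip]
  apply List.ext_getElem
  · simp only [List.length_map, List.length_range, List.length_zip, List.length_drop]
    omega
  · intro i h1 h2
    simp only [List.getElem_map, List.getElem_zip, List.getElem_drop, List.getElem_range]
    simp [pvWin, Nat.add_comm]

lemma pvZipPairs (a : Int) (k : Nat) :
    ((List.range (k-3)).map (pvWin a)).zip
        (((List.range (k+1)).map (pvPri a)).drop 4) = pvPairs a (k-3) := by
  apply List.ext_getElem
  · simp only [pvPairs, List.length_map, List.length_range, List.length_zip, List.length_drop]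
    omega
  · intro i h1 h2
    simp only [pvPairs, List.getElem_map, List.getElem_zip, List.getElem_drop,
      List.getElem_range]
    simp [Nat.add_comm]

lemma pvB_eq (a : Int) (n : Int) :
    generate_many_alt a n = ((pvPairs a (n.toNat-3)).foldl pvStep PySem.Dict.empty).items := by
  have hpr : (List.foldl (fun (st : List Int × Int) (_ : Int) =>
        (st.1 ++ [pvUse (pvGenerate st.2)], pvGenerate st.2)) ([pvUse a], a)
        ((List.range n.toNat).map (fun (j : Nat) => ((0:Int) + (j:Int))))).1
      = (List.range (n.toNat+1)).map (pvPri a) := by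
    rw [pvPricesFold]
    simp only [List.length_map, List.length_range]
    exact pvPrices_eq a n.toNat
  unfold generate_many_alt
  rw [PySem.List.pyRange_one]
  simp only [Int.sub_zero]
  rw [hpr]
  rw [PySem.List.slice_from _ (by norm_num), PySem.List.slice_from _ (by norm_num),
      PySem.List.slice_from _ (by norm_num), PySem.List.slice_from _ (by norm_num),
      PySem.List.slice_from _ (by norm_num)]
  rw [show ((1:Int)).toNat = 1 from rfl, show ((2:Int)).toNat = 2 from rfl,
      show ((3:Int)).toNat = 3 from rfl, show ((4:Int)).toNat = 4 from rfl]
  rw [pvDiffs_eq, pvKeys_eq, pvZipPairs]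
  simp only [pvSetdefault_eq]

-- ===== VERDICT (by name: the statement is the Claim_ definition above) =====
theorem generate_many_spec : Claim_equal_generate_many := by
  intro a n _
  unfold Spec_generate_many
  rw [pvA_eq, pvB_eq]
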